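-- pv_equiv track=rewrite | github.com/Turtwi/inf_428_hw_1 | Cyclic Time Difference/cyclic_time_difference.py | calc_cyclic_time_difference
-- ===== SOURCE A (Python) =====
-- def calc_cyclic_time_difference(hour1: int, hour2: int) -> int:
--     time_diff = 0
--     while hour1 != hour2:
--         hour1 += 1
--         time_diff += 1
--         if(hour1 == 24):
--             hour1 = 0
--     return time_diff
-- ===== SOURCE B (Python) =====
-- def calc_cyclic_time_difference(hour1: int, hour2: int) -> int:
--     return (hour2 - hour1) % 24
-- ===== Notes on version B (the rewrite author's own statement) =====
-- stated objective: simpler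
-- what changed: Replaces the step-by-step increment-and-wrap while loop with the closed form (hour2 - hour1) % 24.
-- outside the precondition, e.g. on calc_cyclic_time_difference(30, 60): A returns 30, B returns 6; on calc_cyclic_time_difference(-30, 3): A returns 33, B returns 9; on calc_cyclic_time_difference(24, 0): A does not finish within the time limit, B returns 0
import Mathlib
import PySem

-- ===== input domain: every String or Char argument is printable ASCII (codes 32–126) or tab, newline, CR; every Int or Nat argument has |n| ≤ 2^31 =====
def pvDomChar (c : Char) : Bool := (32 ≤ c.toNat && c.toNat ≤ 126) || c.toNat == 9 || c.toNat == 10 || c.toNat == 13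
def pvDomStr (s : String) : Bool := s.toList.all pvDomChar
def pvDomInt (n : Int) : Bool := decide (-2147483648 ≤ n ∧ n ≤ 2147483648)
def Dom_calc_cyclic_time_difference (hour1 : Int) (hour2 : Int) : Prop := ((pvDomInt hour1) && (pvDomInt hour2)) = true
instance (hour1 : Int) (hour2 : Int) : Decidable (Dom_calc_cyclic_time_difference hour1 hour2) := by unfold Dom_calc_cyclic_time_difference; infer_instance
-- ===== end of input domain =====

-- B replaces A's increment-and-wrap while loop by the closed form (hour2 - hour1) % 24 (objective: simpler).

-- ===== PORT A =====
-- A's while loop, step for step; the fuel 24 is an upper bound on the number of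
-- iterations on Pre_ (at most 24 steps are needed there), where the loop always terminates.
def pvLoopA : Nat → Int → Int → Int → Int
  | 0, _, _, time_diff => time_diff
  | fuel+1, hour1, hour2, time_diff =>
    if hour1 ≠ hour2 then
      let h := hour1 + 1
      let t := time_diff + 1
      let h' := if h = 24 then 0 else h
      pvLoopA fuel h' hour2 t
    else time_diff

def calc_cyclic_time_difference (hour1 : Int) (hour2 : Int) : Int :=
  pvLoopA 24 hour1 hour2 0

-- ===== PORT B =====
def calc_cyclic_time_difference_alt (hour1 : Int) (hour2 : Int) : Int :=
  PySem.Int.mod (hour2 - hour1) 24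

-- ===== PRECONDITION & SPEC =====
-- Pre_ excludes out-of-range hour values on which A either infinite-loops (e.g. hour1 = 24,
-- hour2 = 0) or returns the raw difference hour2 - hour1 ≥ 24 instead of a cyclic distance
-- (e.g. (30, 60), where A returns 30 and B returns 6): it keeps every input on which A's
-- loop terminates with the true cyclic distance, including out-of-range pairs.
def Pre_calc_cyclic_time_difference (hour1 : Int) (hour2 : Int) : Prop :=
  (0 ≤ hour1 ∧ hour1 ≤ 23 ∧ 0 ≤ hour2 ∧ hour2 ≤ 23) ∨
  (hour1 ≤ hour2 ∧ hour2 - hour1 ≤ 23 ∧ (hour2 ≤ 23 ∨ 24 ≤ hour1))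
instance (hour1 : Int) (hour2 : Int) : Decidable (Pre_calc_cyclic_time_difference hour1 hour2) := by
  unfold Pre_calc_cyclic_time_difference; infer_instance

def pvWitness_calc_cyclic_time_difference : Int × Int := (23, 5)

def Spec_calc_cyclic_time_difference (hour1 : Int) (hour2 : Int) (out : Int) : Prop :=
  out = calc_cyclic_time_difference_alt hour1 hour2
instance (hour1 : Int) (hour2 : Int) (out : Int) : Decidable (Spec_calc_cyclic_time_difference hour1 hour2 out) := by
  unfold Spec_calc_cyclic_time_difference; infer_instance

-- ===== CLAIM (what is proved, stated in full; the proofs are below) =====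
def Claim_equal_calc_cyclic_time_difference : Prop := ∀ (hour1 : Int) (hour2 : Int), Dom_calc_cyclic_time_difference hour1 hour2 → Pre_calc_cyclic_time_difference hour1 hour2 → Spec_calc_cyclic_time_difference hour1 hour2 (calc_cyclic_time_difference hour1 hour2)

-- ===== LEMMAS AND PROOFS =====

-- Counting up from hour1 to hour1 + d without ever touching 24: the loop adds d.
theorem pvLoopA_no_wrap (d : Nat) : ∀ (fuel : Nat) (h1 t : Int), d ≤ fuel →
    (h1 + d < 24 ∨ 24 ≤ h1) → pvLoopA fuel h1 (h1 + d) t = t + d := by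
  induction d with
  | zero =>
    intro fuel h1 t _ _
    cases fuel with
    | zero => simp [pvLoopA]
    | succ f => simp [pvLoopA]
  | succ d ih =>
    intro fuel h1 t hfuel hcond
    cases fuel with
    | zero => omega
    | succ f =>
      have hne : h1 ≠ h1 + (↑(d + 1) : Int) := by push_cast; omega
      have h24 : ¬ (h1 + 1 = 24) := by push_cast at hcond; omega
      simp only [pvLoopA, hne, if_true, h24, if_false, ne_eq, not_false_eq_true]
      have : h1 + (↑(d + 1) : Int) = (h1 + 1) + (↑d : Int) := by push_cast; ring
      rw [this, ih f (h1 + 1) (t + 1) (by omega) (by push_cast at hcond ⊢; omega)]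
      push_cast; ring

-- Counting up from hour1 past 24 (reset to 0) down onto hour2: the loop adds 24 - hour1 + hour2.
theorem pvLoopA_wrap : ∀ (fuel : Nat) (h1 h2 t : Int), h2 < h1 → h1 ≤ 23 → 0 ≤ h2 →
    24 - h1 + h2 ≤ fuel → pvLoopA fuel h1 h2 t = t + (24 - h1 + h2) := by
  intro fuel
  induction fuel with
  | zero => intro h1 h2 t hlt h23 h0 hf; omega
  | succ f ih =>
    intro h1 h2 t hlt h23 h0 hf
    have hne : h1 ≠ h2 := by omega
    by_cases h1eq : h1 + 1 = 24
    · -- h1 = 23: increment wraps to 0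
      simp only [pvLoopA, hne, ne_eq, not_false_eq_true, if_true, h1eq]
      have hd : h2 = (0 : Int) + (h2.toNat : Int) := by omega
      rw [show h2 = (0 : Int) + (h2.toNat : Int) from hd]
      rw [pvLoopA_no_wrap h2.toNat f 0 (t + 1) (by omega) (by omega)]
      omega
    · simp only [pvLoopA, hne, ne_eq, not_false_eq_true, if_true, h1eq, ite_false]
      rw [ih (h1 + 1) h2 (t + 1) (by omega) (by omega) h0 (by omega)]
      ring

-- ===== VERDICT (by name: the statement is the Claim_ definition above) =====
theorem calc_cyclic_time_difference_spec : Claim_equal_calc_cyclic_time_difference := by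
  intro hour1 hour2 _ hpre
  unfold Spec_calc_cyclic_time_difference calc_cyclic_time_difference calc_cyclic_time_difference_alt
  rw [PySem.Int.mod_eq_emod_of_pos (by norm_num : (0:Int) < 24)]
  by_cases hle : hour1 ≤ hour2
  · -- no wrap: hour2 - hour1 steps
    have hd : hour2 - hour1 ≤ 23 := by
      rcases hpre with ⟨_, _, _, _⟩ | ⟨_, h, _⟩ <;> omega
    have hcond : hour1 + ((hour2 - hour1).toNat : Int) < 24 ∨ 24 ≤ hour1 := by
      rcases hpre with ⟨_, _, _, _⟩ | ⟨_, _, h | h⟩ <;> omega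
    have hrw : hour2 = hour1 + ((hour2 - hour1).toNat : Int) := by omega
    rw [hrw, pvLoopA_no_wrap (hour2 - hour1).toNat 24 hour1 0 (by omega) hcond]
    omega
  · -- wrap: hour2 < hour1, so the first disjunct of Pre_ holds
    have hgt : hour2 < hour1 := by omega
    have hb1 : 0 ≤ hour2 := by
      rcases hpre with ⟨_, _, h, _⟩ | ⟨h, _, _⟩ <;> omega
    have hb2 : hour1 ≤ 23 := by
      rcases hpre with ⟨_, h, _, _⟩ | ⟨h, _, _⟩ <;> omega
    rw [pvLoopA_wrap 24 hour1 hour2 0 hgt hb2 hb1 (by omega)]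
    omega
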